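-- pv_equiv track=rewrite | github.com/nav148/Reddit-r-dailyprogrammer-solutions | Challenge 359 [Easy] Regular Paperfold Sequence Generator.py | updatesequence
-- ===== SOURCE A (Python) =====
-- def updatesequence(lst):
--     """
--        Returns the next sequence given an input sequence
--     """
--     temp = []
--     insert = "1"
--     for val in lst:
--         temp.append(insert)
--         temp.append(val)
--         if insert == "1":
--             insert = "0"
--         else:
--             insert = "1"
--     temp.append("0")
--     return temp
-- ===== SOURCE B (Python) =====
-- def updatesequence(lst):
--     """
--        Returns the next sequence given an input sequence
--     """
--     # consume the input two elements per step: each pair contributes the fixed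
--     # chunk ['1', x, '0', y]; no alternating state is maintained at all
--     out = []
--     i = 0
--     n = len(lst)
--     while i + 1 < n:
--         out += ['1', lst[i], '0', lst[i + 1]]
--         i += 2
--     if i < n:
--         out += ['1', lst[i]]
--     out.append('0')
--     return out
-- ===== Notes on version B (the rewrite author's own statement) =====
-- stated objective: alternative
-- what changed: Replaced the element-by-element loop with a toggled insert flag by pairwise chunking: the input is consumed two elements per step, each pair emitting the fixed literal chunk ['1', x, '0', y] (plus a one-element tail chunk when the length is odd), so no alternating state or parity is computed.
import Mathlib
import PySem

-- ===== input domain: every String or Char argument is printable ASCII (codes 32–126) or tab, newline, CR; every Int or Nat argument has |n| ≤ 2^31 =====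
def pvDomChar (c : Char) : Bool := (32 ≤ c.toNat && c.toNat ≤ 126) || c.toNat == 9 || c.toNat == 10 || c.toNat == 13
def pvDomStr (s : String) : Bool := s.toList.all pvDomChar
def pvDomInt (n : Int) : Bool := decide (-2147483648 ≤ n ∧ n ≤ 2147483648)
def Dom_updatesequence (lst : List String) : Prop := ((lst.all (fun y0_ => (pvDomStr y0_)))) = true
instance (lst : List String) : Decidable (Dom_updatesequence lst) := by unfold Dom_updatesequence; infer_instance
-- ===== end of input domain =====

-- B replaces A's per-element loop with a toggled insert flag by a pairwise-chunking
-- while loop (two input elements per step, fixed chunk ["1", x, "0", y], no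
-- alternating state); same O(n) cost (objective: alternative).

-- ===== PORT A =====
-- A: temp = []; insert = "1"; for val in lst: append insert, append val, toggle insert; append "0"
def updatesequence (lst : List String) : List String :=
  (lst.foldl
    (fun (acc : List String × String) val =>
      (acc.1 ++ [acc.2, val], if acc.2 == "1" then "0" else "1"))
    ([], "1")).1 ++ ["0"]

-- ===== PORT B =====
-- B's while loop: while i + 1 < n: out += ['1', lst[i], '0', lst[i+1]]; i += 2
-- (lst[i] and lst[i+1] are always in range here, so List.getD with a dummy
-- default is exact); returns the final (out, i) pair.
def pvBWhile (lst : List String) (n : Nat) (out : List String) (i : Nat) :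
    List String × Nat :=
  if i + 1 < n then
    pvBWhile lst n (out ++ ["1", lst.getD i "", "0", lst.getD (i + 1) ""]) (i + 2)
  else (out, i)
termination_by n - i

-- B: run the pair loop, add the one-element tail chunk if an element remains, append '0'
def updatesequence_alt (lst : List String) : List String :=
  (match pvBWhile lst lst.length [] 0 with
   | (out, i) => if i < lst.length then out ++ ["1", lst.getD i ""] else out) ++ ["0"]

-- ===== PRECONDITION & SPEC =====
def Spec_updatesequence (lst : List String) (out : List String) : Prop := out = updatesequence_alt lst
instance (lst : List String) (out : List String) : Decidable (Spec_updatesequence lst out) := by unfold Spec_updatesequence; infer_instance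

-- ===== CLAIM (what is proved, stated in full; the proofs are below) =====
def Claim_equal_updatesequence : Prop := ∀ (lst : List String), Dom_updatesequence lst → Spec_updatesequence lst (updatesequence lst)

-- ===== LEMMAS AND PROOFS =====

-- canonical value of A's loop (proof-only helper)
def pvPairsAll : List String → List String
  | [] => []
  | [v] => ["1", v]
  | v1 :: v2 :: rest => "1" :: v1 :: "0" :: v2 :: pvPairsAll rest

-- canonical value of B's while loop (the even-length prefix part)
def pvPairsEven : List String → List String
  | v1 :: v2 :: rest => "1" :: v1 :: "0" :: v2 :: pvPairsEven rest
  | _ => []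

theorem pvA_fold (lst : List String) : ∀ (t : List String),
    (lst.foldl
      (fun (acc : List String × String) val =>
        (acc.1 ++ [acc.2, val], if acc.2 == "1" then "0" else "1"))
      (t, "1")).1 = t ++ pvPairsAll lst := by
  induction lst using pvPairsAll.induct with
  | case1 => intro t; simp [pvPairsAll]
  | case2 v => intro t; simp [pvPairsAll]
  | case3 v1 v2 rest ih =>
    intro t
    have e11 : (("1" : String) == "1") = true := by decide
    have e01 : (("0" : String) == "1") = false := by decide
    simp only [List.foldl_cons, e11, e01, if_true,
      Bool.false_eq_true, if_false]
    rw [ih]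
    simp [pvPairsAll]

theorem pvB_loop (lst : List String) : ∀ (rest : List String) (i : Nat) (out : List String),
    i ≤ lst.length → lst.drop i = rest →
    pvBWhile lst lst.length out i
      = (out ++ pvPairsEven rest, lst.length - rest.length % 2) := by
  intro rest
  induction rest using pvPairsEven.induct with
  | case1 v1 v2 r ih =>
    intro i out hile hdrop
    have hlen : lst.length - i = r.length + 2 := by
      have := congrArg List.length hdrop; simpa using this
    have hi2 : i + 2 ≤ lst.length := by omega
    have hv1 : lst.getD i "" = v1 := by
      have h0 : lst[i]? = (lst.drop i)[0]? := by
        simp [List.getElem?_drop]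
      rw [hdrop] at h0
      simp [List.getD, h0]
    have hv2 : lst.getD (i + 1) "" = v2 := by
      have h1 : lst[i + 1]? = (lst.drop i)[1]? := by
        simp [List.getElem?_drop]
      rw [hdrop] at h1
      simp [List.getD, h1]
    have hdrop2 : lst.drop (i + 2) = r := by
      have h2 : (lst.drop i).drop 2 = r := by rw [hdrop]; rfl
      rw [List.drop_drop] at h2
      simpa [Nat.add_comm] using h2
    rw [pvBWhile]
    rw [if_pos (by omega)]
    rw [ih (i + 2) _ (by omega) hdrop2, hv1, hv2]
    simp only [pvPairsEven, List.length_cons, Prod.mk.injEq]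
    exact ⟨by simp, by omega⟩
  | case2 rest hshape =>
    intro i out hile hdrop
    have hlen : lst.length - i = rest.length := by
      have := congrArg List.length hdrop; simpa using this
    have hsmall : rest.length ≤ 1 := by
      match rest, hshape with
      | [], _ => simp
      | [v], _ => simp
      | v1 :: v2 :: r, h => exact absurd rfl (h v1 v2 r)
    rw [pvBWhile, if_neg (by omega)]
    match rest, hshape, hlen with
    | [], _, hlen =>
      simp only [List.length_nil] at hlen
      simp [pvPairsEven]
      omega
    | [v], _, hlen =>
      simp only [List.length_cons, List.length_nil] at hlen
      simp [pvPairsEven]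
      omega

-- pvPairsAll = pvPairsEven plus the odd tail chunk
theorem pvPairs_split (lst : List String) :
    pvPairsAll lst
      = if lst.length % 2 = 1
          then pvPairsEven lst ++ ["1", lst.getD (lst.length - 1) ""]
          else pvPairsEven lst := by
  induction lst using pvPairsAll.induct with
  | case1 => simp [pvPairsAll, pvPairsEven]
  | case2 v => simp [pvPairsAll, pvPairsEven, List.getD]
  | case3 v1 v2 rest ih =>
    simp only [pvPairsAll, pvPairsEven, List.length_cons]
    have hmod : (rest.length + 1 + 1) % 2 = rest.length % 2 := by omega
    rw [hmod]
    rcases Nat.mod_two_eq_zero_or_one rest.length with h | h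
    · rw [if_neg (by omega)] at ih ⊢
      rw [ih]
    · rw [if_pos h] at ih
      rw [if_pos h, ih]
      have hr : rest ≠ [] := by
        intro hnil; rw [hnil] at h; simp at h
      have hidx : (v1 :: v2 :: rest).getD (rest.length + 1 + 1 - 1) ""
          = rest.getD (rest.length - 1) "" := by
        have hlen : rest.length + 1 + 1 - 1 = rest.length + 1 := by omega
        rw [hlen]
        simp only [List.getD, List.getElem?_cons]
        have h1 : rest.length + 1 ≠ 0 := by omega
        have h2 : rest.length ≠ 0 := by
          intro h0; exact hr (List.eq_nil_of_length_eq_zero h0)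
        simp only [if_neg h1]
        have : rest.length + 1 - 1 = rest.length := by omega
        rw [this]
        simp only [if_neg h2]
      rw [hidx]
      simp

-- ===== VERDICT (by name: the statement is the Claim_ definition above) =====
theorem updatesequence_spec : Claim_equal_updatesequence := by
  intro lst _
  unfold Spec_updatesequence updatesequence updatesequence_alt
  rw [pvA_fold lst [], pvB_loop lst lst (0 : Nat) [] (by omega) (by simp)]
  simp only [List.nil_append]
  rw [pvPairs_split lst]
  split_ifs with h1 h2 h2
  · simp [h1]
  · exfalso; omega
  · exfalso; omega
  · rfl
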